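-- pv_equiv track=rewrite | github.com/yakiro-nvg/wojd_trans | scripts/import_locres.py | index_catalog
-- ===== SOURCE A (Python) =====
-- from typing import Dict, Iterable, Tuple
--
-- def index_catalog(rows: list[dict]) -> Dict[Tuple[str, str], int]:
--     index: Dict[Tuple[str, str], int] = {}
--     for idx, row in enumerate(rows):
--         ns = (row.get("namespace") or "").strip()
--         key = (row.get("key") or "").strip()
--         if not key:
--             continue
--         pair = (ns, key)
--         if pair not in index:
--             index[pair] = idx
--     return index
-- ===== SOURCE B (Python) =====
-- from typing import Dict, Tuple
--
--
-- def _pair(row: dict) -> Tuple[str, str]: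
--     return ((row.get("namespace") or "").strip(), (row.get("key") or "").strip())
--
--
-- def index_catalog(rows: list) -> Dict[Tuple[str, str], int]:
--     pairs = [(_pair(row), idx) for idx, row in enumerate(rows)]
--     pairs = [(pair, idx) for pair, idx in pairs if pair[1]]
--     first = dict(reversed(pairs))
--     return {pair: first[pair] for pair, _ in pairs}
-- ===== Notes on version B (the rewrite author's own statement) =====
-- stated objective: alternative
-- what changed: B replaces A's single stateful loop with a membership guard by a comprehension pipeline: it lists all valid (pair, idx) candidates, builds a first-occurrence lookup via dict(reversed(pairs)), and emits the result as one dict comprehension with no membership test.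
import Mathlib
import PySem

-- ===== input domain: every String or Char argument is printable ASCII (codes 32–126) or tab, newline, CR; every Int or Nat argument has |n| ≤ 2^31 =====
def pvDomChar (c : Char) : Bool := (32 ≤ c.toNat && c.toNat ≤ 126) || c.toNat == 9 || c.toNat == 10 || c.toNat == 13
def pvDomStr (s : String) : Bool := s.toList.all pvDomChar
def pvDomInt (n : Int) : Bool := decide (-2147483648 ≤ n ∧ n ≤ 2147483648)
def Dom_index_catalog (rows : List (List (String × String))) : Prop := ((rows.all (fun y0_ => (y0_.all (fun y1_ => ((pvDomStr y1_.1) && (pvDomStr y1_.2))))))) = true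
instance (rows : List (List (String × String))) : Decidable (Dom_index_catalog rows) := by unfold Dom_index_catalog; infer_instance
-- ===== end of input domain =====

-- B replaces A's stateful loop with a membership guard by a comprehension pipeline:
-- list the valid (pair, idx) candidates, build a first-occurrence lookup with
-- dict(reversed(pairs)), and emit the result as one dict comprehension.

-- ===== PORT A =====
-- shared by both ports: (row.get(k) or "").strip() — the same expression appears in both Pythons
def pvField (row : List (String × String)) (k : String) : String :=
  PySem.Str.strip (((PySem.Dict.mk row).get? k).getD "")

-- loop body of A (one iteration of 'for idx, row in enumerate(rows)')
def pvStepA (index : PySem.Dict (String × String) Int)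
    (ir : Int × List (String × String)) : PySem.Dict (String × String) Int :=
  let ns := pvField ir.2 "namespace"
  let key := pvField ir.2 "key"
  if key = "" then index
  else
    let pair := (ns, key)
    if index.contains pair then index else index.insert pair ir.1

def index_catalog (rows : List (List (String × String))) : List (String × String × Int) :=
  (((PySem.List.enumerate rows 0).foldl pvStepA PySem.Dict.empty).items).map
    (fun p => (p.1.1, p.1.2, p.2))

-- ===== PORT B =====
-- Source B: pairs = [(_pair(row), idx) for idx, row in enumerate(rows)]
--       pairs = [(pair, idx) for pair, idx in pairs if pair[1]]
--       first = dict(reversed(pairs)); return {pair: first[pair] for pair, _ in pairs}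
-- first[pair] cannot raise (pair comes from pairs), so the .getD 0 default is unreachable
def index_catalog_alt (rows : List (List (String × String))) : List (String × String × Int) :=
  let pairs0 := (PySem.List.enumerate rows 0).map
    (fun ir => ((pvField ir.2 "namespace", pvField ir.2 "key"), ir.1))
  let pairs := pairs0.filter (fun pi => pi.1.2 != "")
  let first := PySem.Dict.ofList pairs.reverse
  ((pairs.foldl (fun d pi => d.insert pi.1 ((first.get? pi.1).getD 0)) PySem.Dict.empty).items).map
    (fun p => (p.1.1, p.1.2, p.2))

-- ===== PRECONDITION & SPEC =====
def Spec_index_catalog (rows : List (List (String × String))) (out : List (String × String × Int)) : Prop := out = index_catalog_alt rows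
instance (rows : List (List (String × String))) (out : List (String × String × Int)) : Decidable (Spec_index_catalog rows out) := by unfold Spec_index_catalog; infer_instance

-- ===== CLAIM (what is proved, stated in full; the proofs are below) =====
def Claim_equal_index_catalog : Prop := ∀ (rows : List (List (String × String))), Dom_index_catalog rows → Spec_index_catalog rows (index_catalog rows)

-- ===== LEMMAS AND PROOFS =====
-- the candidate entries ((ns, key), idx) of rows with a nonempty key, indices starting at s
def pvCands : List (List (String × String)) → Int → List ((String × String) × Int)
  | [], _ => []
  | r :: t, s =>
    if pvField r "key" = "" then pvCands t (s + 1)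
    else ((pvField r "namespace", pvField r "key"), s) :: pvCands t (s + 1)

-- first match in an association list
def pvLookup : List ((String × String) × Int) → (String × String) → Option Int
  | [], _ => none
  | x :: t, p => if x.1 = p then some x.2 else pvLookup t p

-- A's guarded insert
def pvGIns (d : PySem.Dict (String × String) Int) (x : (String × String) × Int) :
    PySem.Dict (String × String) Int :=
  if d.contains x.1 then d else d.insert x.1 x.2

-- B's candidate list is pvCands
theorem pvPairs_eq (rows : List (List (String × String))) : ∀ s : Int,
    (((PySem.List.enumerate rows s).map
        (fun ir => ((pvField ir.2 "namespace", pvField ir.2 "key"), ir.1))).filter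
      (fun pi => pi.1.2 != "")) = pvCands rows s := by
  induction rows with
  | nil => intro s; simp [PySem.List.enumerate_nil, pvCands]
  | cons r t ih =>
      intro s
      rw [PySem.List.enumerate_cons]
      simp only [List.map_cons, List.filter_cons, pvCands]
      by_cases h : pvField r "key" = "" <;> simp [h, ih (s + 1)]

-- A's loop is the guarded fold over the candidates
theorem pvA_shape (rows : List (List (String × String))) :
    ∀ (s : Int) (d : PySem.Dict (String × String) Int),
      (PySem.List.enumerate rows s).foldl pvStepA d = (pvCands rows s).foldl pvGIns d := by
  induction rows with
  | nil => intro s d; simp [PySem.List.enumerate_nil, pvCands]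
  | cons r t ih =>
      intro s d
      rw [PySem.List.enumerate_cons]
      simp only [List.foldl_cons, pvCands]
      by_cases h : pvField r "key" = ""
      · rw [if_pos h, ih]
        have hs : pvStepA d (s, r) = d := by simp [pvStepA, h]
        rw [hs]
      · rw [if_neg h]
        simp only [List.foldl_cons]
        rw [ih]
        have hs : pvStepA d (s, r) = pvGIns d ((pvField r "namespace", pvField r "key"), s) := by
          simp [pvStepA, pvGIns, h]
        rw [hs]

-- dict(reversed(pairs)) looks up the FIRST occurrence in pairs
theorem pvOfListRev_get (c : List ((String × String) × Int)) :
    ∀ (d : PySem.Dict (String × String) Int) (p : String × String),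
      ((c.reverse.foldl (fun d x => d.insert x.1 x.2) d).get? p) = (pvLookup c p).or (d.get? p) := by
  induction c with
  | nil => intro d p; simp [pvLookup]
  | cons x t ih =>
      intro d p
      rw [List.reverse_cons, List.foldl_append]
      simp only [List.foldl_cons, List.foldl_nil, pvLookup]
      by_cases hp : x.1 = p
      · subst hp
        rw [PySem.Dict.get?_insert, if_pos rfl, if_pos rfl]
        simp
      · rw [PySem.Dict.get?_insert, if_neg (fun h => hp h.symm), if_neg hp, ih]

-- inserting the value a key already has changes nothing (keys unique)
theorem pvInsertSelf (d : PySem.Dict (String × String) Int) (k : String × String) (v : Int)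
    (h : d.get? k = some v) (hn : d.keys.Nodup) : d.insert k v = d := by
  apply PySem.Dict.ext
  have hc : d.contains k := by rw [PySem.Dict.contains_eq_isSome_get?, h]; rfl
  rw [PySem.Dict.items_insert_of_contains d v hc]
  have hcong : ∀ p ∈ d.items, (if p.1 == k then (k, v) else p) = p := by
    rintro ⟨k', v'⟩ hp
    by_cases he : k' = k
    · have hg : d.get? k' = some v' := PySem.Dict.get?_of_mem_items d hp hn
      rw [he, h] at hg
      rw [if_pos (by simp [he])]
      simp at hg ⊢
      exact ⟨he.symm, hg⟩
    · rw [if_neg (by simp [he])]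
  rw [List.map_congr_left hcong]
  simp

-- core: the guarded fold equals the unconditional fold inserting g pair, when g agrees
-- with every pending first occurrence and every stored value
theorem pvFoldEq (g : String × String → Int) :
    ∀ (c : List ((String × String) × Int)) (d : PySem.Dict (String × String) Int),
      (∀ k v, pvLookup c k = some v → d.contains k = false → v = g k) →
      (∀ k v, d.get? k = some v → v = g k) →
      d.keys.Nodup →
      c.foldl pvGIns d = c.foldl (fun d x => d.insert x.1 (g x.1)) d := by
  intro c
  induction c with
  | nil => intro d _ _ _; rfl
  | cons x t ih =>
      intro d h1 h2 hn
      simp only [List.foldl_cons]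
      by_cases hc : d.contains x.1
      · rcases Option.isSome_iff_exists.mp
          (by rw [← PySem.Dict.contains_eq_isSome_get?, hc] : (d.get? x.1).isSome) with ⟨v, hv⟩
        rw [show pvGIns d x = d by simp [pvGIns, hc],
          pvInsertSelf d x.1 (g x.1) (by rw [hv, h2 x.1 v hv]) hn]
        apply ih d _ h2 hn
        intro k v hk hkc
        have hne : x.1 ≠ k := fun he => by rw [← he, hc] at hkc; cases hkc
        exact h1 k v (by simp [pvLookup, hne]; exact hk) hkc
      · have hx2 : x.2 = g x.1 := h1 x.1 x.2 (by simp [pvLookup]) (by simpa using hc)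
        rw [show pvGIns d x = d.insert x.1 x.2 by simp [pvGIns, hc], hx2]
        apply ih
        · intro k v hk hkc
          have hne : x.1 ≠ k := by
            intro he
            rw [← he, PySem.Dict.contains_insert_self] at hkc
            cases hkc
          refine h1 k v (by simp [pvLookup, hne]; exact hk) ?_
          rw [PySem.Dict.contains_insert] at hkc
          rcases Bool.or_eq_false_iff.mp hkc with ⟨_, h⟩
          exact h
        · intro k v hk
          rw [PySem.Dict.get?_insert] at hk
          by_cases he : k = x.1
          · rw [if_pos he] at hk
            subst he
            simp at hk
            omega
          · rw [if_neg he] at hk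
            exact h2 k v hk
        · exact PySem.Dict.nodup_keys_insert d x.1 (g x.1) hn

-- ===== VERDICT (by name: the statement is the Claim_ definition above) =====
theorem index_catalog_spec : Claim_equal_index_catalog := by
  intro rows _
  unfold Spec_index_catalog index_catalog index_catalog_alt
  simp only [pvPairs_eq rows 0]
  rw [pvA_shape rows 0]
  have hg : PySem.Dict.ofList (pvCands rows 0).reverse
      = (pvCands rows 0).reverse.foldl (fun d x => d.insert x.1 x.2) PySem.Dict.empty := by
    simp [PySem.Dict.ofList, PySem.Dict.update]
  rw [pvFoldEq (fun k => ((PySem.Dict.ofList (pvCands rows 0).reverse).get? k).getD 0)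
    (pvCands rows 0) PySem.Dict.empty ?_ ?_ ?_]
  · intro k v hk _
    simp only [hg]
    rw [pvOfListRev_get, hk]
    simp
  · intro k v hk
    rw [PySem.Dict.get?_empty] at hk
    cases hk
  · simp [PySem.Dict.keys_empty]
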